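-- pv_equiv track=rewrite | github.com/JanssenProject/jans | jans-linux-setup/jans_setup/setup_app/pylib/parse_dn.py | _escape_attribute_value
-- ===== SOURCE A (Python) =====
-- from string import ascii_letters, digits, hexdigits
--
-- STATE_ANY = 0
--
-- STATE_ESCAPE = 1
--
-- STATE_ESCAPE_HEX = 2
--
-- def _escape_attribute_value(attribute_value):
--     if not attribute_value:
--         return ''
--
--     if attribute_value[0] == '#':  # with leading SHARP only pairs of hex characters are valid
--         valid_hex = True
--         if len(attribute_value) % 2 == 0:  # string must be # + HEX HEX (an odd number of chars)
--             valid_hex = False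
--
--         if valid_hex:
--             for c in attribute_value:
--                 if c not in hexdigits:  # allowed only hex digits as per RFC 4514
--                     valid_hex = False
--                     break
--
--         if valid_hex:
--             return attribute_value
--
--     state = STATE_ANY
--     escaped = ''
--     tmp_buffer = ''
--     for c in attribute_value:
--         if state == STATE_ANY:
--             if c == '\\':
--                 state = STATE_ESCAPE
--             elif c in '"#+,;<=>\00':
--                 escaped += '\\' + c
--             else:
--                 escaped += c
--         elif state == STATE_ESCAPE:
--             if c in hexdigits:
--                 tmp_buffer = c
--                 state = STATE_ESCAPE_HEX
--             elif c in ' "#+,;<=>\\\00':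
--                 escaped += '\\' + c
--                 state = STATE_ANY
--             else:
--                 escaped += '\\\\' + c
--         elif state == STATE_ESCAPE_HEX:
--             if c in hexdigits:
--                 escaped += '\\' + tmp_buffer + c
--             else:
--                 escaped += '\\\\' + tmp_buffer + c
--             tmp_buffer = ''
--             state = STATE_ANY
--
--     # final state
--     if state == STATE_ESCAPE:
--         escaped += '\\\\'
--     elif state == STATE_ESCAPE_HEX:
--         escaped += '\\\\' + tmp_buffer
--
--     if escaped[0] == ' ':  # leading SPACE must be escaped
--         escaped = '\\' + escaped
--
--     if escaped[-1] == ' ' and len(escaped) > 1 and escaped[-2] != '\\':  # trailing SPACE must be escaped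
--         escaped = escaped[:-1] + '\\ '
--
--     return escaped
-- ===== SOURCE B (Python) =====
-- from string import hexdigits
--
-- # Index-driven lookahead scan instead of A's three-state machine; A's dead
-- # leading-'#' fast path (its validity loop also tests '#' itself, so it never
-- # fires) is dropped.  Return value matches A exactly.
-- def _escape_attribute_value(attribute_value):
--     if not attribute_value:
--         return ''
--     hexd = frozenset(hexdigits)
--     out = []
--     n = len(attribute_value)
--     i = 0
--     while i < n:
--         c = attribute_value[i]
--         i += 1
--         if c != '\\':
--             out.append('\\' + c if c in '"#+,;<=>\00' else c)
--             continue
--         # backslash starts an escape run: consume chars until it resolves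
--         while True:
--             if i == n:
--                 out.append('\\\\')
--                 break
--             d = attribute_value[i]
--             i += 1
--             if d in hexd:
--                 if i < n:
--                     e = attribute_value[i]
--                     i += 1
--                     out.append(('\\' if e in hexd else '\\\\') + d + e)
--                 else:
--                     out.append('\\\\' + d)
--                 break
--             if d in ' "#+,;<=>\\\00':
--                 out.append('\\' + d)
--                 break
--             out.append('\\\\' + d)  # unresolved: the run continues
--     escaped = ''.join(out)
--     if escaped[0] == ' ':
--         escaped = '\\' + escaped
--     if escaped[-1] == ' ' and len(escaped) > 1 and escaped[-2] != '\\':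
--         escaped = escaped[:-1] + '\\ '
--     return escaped
-- ===== Notes on version B (the rewrite author's own statement) =====
-- stated objective: simpler
-- what changed: Replaces the three-state machine with an index-driven lookahead scan (backslash starts an explicit escape-run loop that looks ahead at the next one or two characters) and drops A's dead leading-sharp fast path, whose validity loop also tests the sharp sign itself and therefore never fires.
import Mathlib
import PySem

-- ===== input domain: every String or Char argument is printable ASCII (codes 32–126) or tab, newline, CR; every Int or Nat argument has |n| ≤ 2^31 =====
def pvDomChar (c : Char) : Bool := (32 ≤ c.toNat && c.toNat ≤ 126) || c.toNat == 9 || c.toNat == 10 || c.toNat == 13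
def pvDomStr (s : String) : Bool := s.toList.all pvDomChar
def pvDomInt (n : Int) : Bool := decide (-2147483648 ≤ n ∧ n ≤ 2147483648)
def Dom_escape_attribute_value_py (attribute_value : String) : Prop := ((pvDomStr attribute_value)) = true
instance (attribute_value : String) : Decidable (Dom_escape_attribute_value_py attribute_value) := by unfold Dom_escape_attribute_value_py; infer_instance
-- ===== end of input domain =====

-- B replaces A's three-state machine by an index-driven lookahead scan and drops A's
-- dead leading-sharp fast path (its validity loop also tests the sharp sign itself, so it never fires);
-- objective: simpler. Return values proved equal on all strings.

-- ===== PORT A =====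
-- string.hexdigits
def pvHexdigits : List Char := "0123456789abcdefABCDEF".toList
-- the characters '"#+,;<=>\00' (STATE_ANY special set)
def pvSpecAny : List Char := "\"#+,;<=>".toList ++ ['\u0000']
-- the characters ' "#+,;<=>\\\00' (STATE_ESCAPE special set)
def pvSpecEsc : List Char := " \"#+,;<=>\\".toList ++ ['\u0000']

-- the two trailing fixup lines (identical in A's and B's Python, shared here):
-- leading-space and trailing-unescaped-space escaping; esc is never [] when reached
def pvFixSpaces (esc : List Char) : List Char :=
  let esc2 := if esc.getD 0 '?' = ' ' then '\\' :: esc else esc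
  if esc2.getD (esc2.length - 1) '?' = ' ' ∧ esc2.length > 1 ∧
      esc2.getD (esc2.length - 2) '?' ≠ '\\' then
    esc2.dropLast ++ ['\\', ' ']
  else esc2

-- one step of A's state machine: state (0=ANY,1=ESCAPE,2=ESCAPE_HEX), escaped, tmp_buffer
def pvStepA (st : Nat × List Char × List Char) (c : Char) : Nat × List Char × List Char :=
  let (state, escaped, tmp) := st
  if state = 0 then
    if c = '\\' then (1, escaped, tmp)
    else if c ∈ pvSpecAny then (0, escaped ++ ['\\', c], tmp)
    else (0, escaped ++ [c], tmp)
  else if state = 1 then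
    if c ∈ pvHexdigits then (2, escaped, [c])
    else if c ∈ pvSpecEsc then (0, escaped ++ ['\\', c], tmp)
    else (1, escaped ++ ['\\', '\\', c], tmp)  -- as in A: state stays STATE_ESCAPE
  else
    if c ∈ pvHexdigits then (0, escaped ++ '\\' :: (tmp ++ [c]), [])
    else (0, escaped ++ '\\' :: '\\' :: (tmp ++ [c]), [])

-- the '# final state' lines of A
def pvFinA (st : Nat × List Char × List Char) : List Char :=
  let (state, escaped, tmp) := st
  if state = 1 then escaped ++ ['\\', '\\']
  else if state = 2 then escaped ++ '\\' :: '\\' :: tmp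
  else escaped

def escape_attribute_value_py (attribute_value : String) : String :=
  match attribute_value.toList with
  | [] => ""
  | c0 :: _ =>
    let s := attribute_value.toList
    -- leading-SHARP fast path: valid_hex = (length is odd) and every char is a hexdigit
    let valid_hex := c0 = '#' ∧ ¬ s.length % 2 = 0 ∧ ∀ c ∈ s, c ∈ pvHexdigits
    if valid_hex then attribute_value
    else
      let esc := pvFinA (s.foldl pvStepA (0, [], []))
      String.ofList (pvFixSpaces esc)

-- ===== PORT B =====
mutual
-- plain mode of B's index scan (a char at a time, backslash enters the escape run)
def pvScanB : List Char → List Char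
  | [] => []
  | c :: rest =>
    if c = '\\' then pvEscRunB rest
    else if c ∈ pvSpecAny then '\\' :: c :: pvScanB rest
    else c :: pvScanB rest
-- escape run: consume chars after a backslash until the run resolves
def pvEscRunB : List Char → List Char
  | [] => ['\\', '\\']
  | d :: rest =>
    if d ∈ pvHexdigits then pvHexB d rest
    else if d ∈ pvSpecEsc then '\\' :: d :: pvScanB rest
    else '\\' :: '\\' :: d :: pvEscRunB rest  -- unresolved: the run continues
-- a hexdigit d was consumed inside the run: look one char further ahead
def pvHexB (d : Char) : List Char → List Char
  | [] => ['\\', '\\', d]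
  | e :: rest =>
    (if e ∈ pvHexdigits then ['\\', d, e] else ['\\', '\\', d, e]) ++ pvScanB rest
end

def escape_attribute_value_py_alt (attribute_value : String) : String :=
  match attribute_value.toList with
  | [] => ""
  | s => String.ofList (pvFixSpaces (pvScanB s))

-- ===== PRECONDITION & SPEC =====
def Spec_escape_attribute_value_py (attribute_value : String) (out : String) : Prop := out = escape_attribute_value_py_alt attribute_value
instance (attribute_value : String) (out : String) : Decidable (Spec_escape_attribute_value_py attribute_value out) := by unfold Spec_escape_attribute_value_py; infer_instance

-- ===== CLAIM (what is proved, stated in full; the proofs are below) =====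
def Claim_equal_escape_attribute_value_py : Prop := ∀ (attribute_value : String), Dom_escape_attribute_value_py attribute_value → Spec_escape_attribute_value_py attribute_value (escape_attribute_value_py attribute_value)

-- ===== LEMMAS AND PROOFS =====

-- behaviour of B's escape run once a hexdigit d has been consumed (tmp_buffer = t on A's side)
def pvHexContB (t : List Char) : List Char → List Char
  | [] => '\\' :: '\\' :: t
  | e :: rest =>
    (if e ∈ pvHexdigits then '\\' :: (t ++ [e]) else '\\' :: '\\' :: (t ++ [e])) ++ pvScanB rest

-- joint loop invariant: A's machine started in each of its three states computes B's scans
theorem pvLoopEq (l : List Char) :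
    (∀ esc t, pvFinA (l.foldl pvStepA (0, esc, t)) = esc ++ pvScanB l)
    ∧ (∀ esc t, pvFinA (l.foldl pvStepA (1, esc, t)) = esc ++ pvEscRunB l)
    ∧ (∀ esc t, pvFinA (l.foldl pvStepA (2, esc, t)) = esc ++ pvHexContB t l) := by
  induction l with
  | nil => refine ⟨?_, ?_, ?_⟩ <;> intro esc t <;> simp [pvFinA, pvScanB, pvEscRunB, pvHexContB]
  | cons c r ih =>
    obtain ⟨ih0, ih1, ih2⟩ := ih
    refine ⟨?_, ?_, ?_⟩ <;> intro esc t <;> rw [List.foldl_cons]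
    · by_cases hb : c = '\\'
      · rw [show pvStepA (0, esc, t) c = (1, esc, t) from by simp [pvStepA, hb], ih1]
        simp [pvScanB, hb]
      · by_cases hs : c ∈ pvSpecAny
        · rw [show pvStepA (0, esc, t) c = (0, esc ++ ['\\', c], t) from by simp [pvStepA, hb, hs], ih0]
          simp [pvScanB, hb, hs]
        · rw [show pvStepA (0, esc, t) c = (0, esc ++ [c], t) from by simp [pvStepA, hb, hs], ih0]
          simp [pvScanB, hb, hs]
    · by_cases hh : c ∈ pvHexdigits
      · rw [show pvStepA (1, esc, t) c = (2, esc, [c]) from by simp [pvStepA, hh], ih2]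
        cases r with
        | nil => simp [pvHexContB, pvEscRunB, pvHexB, hh]
        | cons e r' =>
          by_cases he : e ∈ pvHexdigits <;> simp [pvHexContB, pvEscRunB, pvHexB, hh, he]
      · by_cases hs : c ∈ pvSpecEsc
        · rw [show pvStepA (1, esc, t) c = (0, esc ++ ['\\', c], t) from by simp [pvStepA, hh, hs], ih0]
          simp [pvEscRunB, hh, hs]
        · rw [show pvStepA (1, esc, t) c = (1, esc ++ ['\\', '\\', c], t) from by simp [pvStepA, hh, hs], ih1]
          simp [pvEscRunB, hh, hs]
    · by_cases hh : c ∈ pvHexdigits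
      · rw [show pvStepA (2, esc, t) c = (0, esc ++ '\\' :: (t ++ [c]), []) from by simp [pvStepA, hh], ih0]
        simp [pvHexContB, hh]
      · rw [show pvStepA (2, esc, t) c = (0, esc ++ '\\' :: '\\' :: (t ++ [c]), []) from by simp [pvStepA, hh], ih0]
        simp [pvHexContB, hh]

-- ===== VERDICT (by name: the statement is the Claim_ definition above) =====
theorem escape_attribute_value_py_spec : Claim_equal_escape_attribute_value_py := by
  intro attribute_value _
  unfold Spec_escape_attribute_value_py escape_attribute_value_py escape_attribute_value_py_alt
  cases h : attribute_value.toList with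
  | nil => simp
  | cons c0 rest =>
    simp only [h]
    have hfast : ¬ (c0 = '#' ∧ ¬ (c0 :: rest).length % 2 = 0 ∧ ∀ c ∈ (c0 :: rest), c ∈ pvHexdigits) := by
      rintro ⟨hc, -, hall⟩
      have := hall c0 (by simp)
      rw [hc] at this
      simp [pvHexdigits] at this
    rw [if_neg hfast]
    rw [(pvLoopEq (c0 :: rest)).1 [] []]
    simp
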